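-- pv_equiv track=rewrite | github.com/Arsen1302/Code-copy-detector | TestData/solutions/problem_1478_2.py | solution_1478_2
-- ===== SOURCE A (Python) =====
-- from typing import List
--
-- def solution_1478_2(nums: List[int]) -> List[int]:
--     dict1=dict()
--     l=[]
--     for i in nums:
--         if(i in dict1.keys()):
--             dict1[i]=-1
--         else:
--             dict1[i]=1
--         dict1[i-1]=-1
--         dict1[i+1]=-1
--     for i in nums:
--         if(dict1[i]==1):
--             l.append(i)
--     return l
-- ===== SOURCE B (Python) =====
-- from typing import List
--
-- def solution_1478_2(nums: List[int]) -> List[int]: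
--     s = sorted(nums)
--     lonely = set()
--     for k, x in enumerate(s):
--         if (k == 0 or x - s[k - 1] > 1) and (k == len(s) - 1 or s[k + 1] - x > 1):
--             lonely.add(x)
--     return [x for x in nums if x in lonely]
-- ===== Notes on version B (the rewrite author's own statement) =====
-- stated objective: alternative
-- what changed: B sorts nums and scans the sorted array for elements whose sorted neighbors differ by more than 1 (which simultaneously implies uniqueness and absent x-1/x+1), collecting them in a set and filtering nums by it, instead of A's single hash pass that marks every value and its two neighbors with -1 sentinels in one dict.
import Mathlib
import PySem

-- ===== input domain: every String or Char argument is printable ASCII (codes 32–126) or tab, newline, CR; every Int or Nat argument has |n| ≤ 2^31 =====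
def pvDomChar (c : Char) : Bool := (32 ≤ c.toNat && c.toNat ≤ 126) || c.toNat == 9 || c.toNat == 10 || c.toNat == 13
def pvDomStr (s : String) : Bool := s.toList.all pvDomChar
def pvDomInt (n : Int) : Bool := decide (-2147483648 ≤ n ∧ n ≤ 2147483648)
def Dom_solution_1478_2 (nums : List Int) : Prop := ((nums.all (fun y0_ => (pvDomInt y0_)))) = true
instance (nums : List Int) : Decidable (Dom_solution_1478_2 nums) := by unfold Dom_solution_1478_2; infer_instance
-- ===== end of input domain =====

-- B sorts nums and keeps the values whose sorted neighbors are more than 1 away (a set used to filter nums),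
-- instead of A's single hash pass marking each value and its two neighbors with -1 sentinels in one dict.

-- ===== PORT A =====
def solution_1478_2 (nums : List Int) : List Int :=
  let dict1 : PySem.Dict Int Int :=
    nums.foldl (fun d i =>
      (((if d.contains i then d.insert i (-1) else d.insert i 1).insert
          (i - 1) (-1)).insert (i + 1) (-1))) PySem.Dict.empty
  nums.foldl (fun l i => if dict1.getD i 0 = 1 then l ++ [i] else l) []

-- ===== PORT B =====
def solution_1478_2_alt (nums : List Int) : List Int :=
  let s := PySem.List.sorted nums (fun x => x) false
  let lonely : PySem.Set Int :=
    (PySem.List.enumerate s).foldl (fun g p =>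
      if ((p.1 == 0) || decide (p.2 - PySem.List.pyGetD s (p.1 - 1) 0 > 1)) &&
         ((p.1 == (s.length : Int) - 1) || decide (PySem.List.pyGetD s (p.1 + 1) 0 - p.2 > 1))
      then PySem.Set.add g p.2 else g) PySem.Set.empty
  nums.filter (fun x => PySem.Set.contains lonely x)

-- ===== PRECONDITION & SPEC =====
def Spec_solution_1478_2 (nums : List Int) (out : List Int) : Prop := out = solution_1478_2_alt nums
instance (nums : List Int) (out : List Int) : Decidable (Spec_solution_1478_2 nums out) := by unfold Spec_solution_1478_2; infer_instance

-- ===== CLAIM (what is proved, stated in full; the proofs are below) =====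
def Claim_equal_solution_1478_2 : Prop := ∀ (nums : List Int), Dom_solution_1478_2 nums → Spec_solution_1478_2 nums (solution_1478_2 nums)

-- ===== LEMMAS AND PROOFS =====

-- A's loop step on the dict
def pvStepA (d : PySem.Dict Int Int) (i : Int) : PySem.Dict Int Int :=
  (((if d.contains i then d.insert i (-1) else d.insert i 1).insert
      (i - 1) (-1)).insert (i + 1) (-1))

-- characterisation of A's dict after processing prefix p
def pvSpecA (p : List Int) (x : Int) : Option Int :=
  if x ∈ p ∨ x - 1 ∈ p ∨ x + 1 ∈ p then
    some (if p.count x = 1 ∧ x - 1 ∉ p ∧ x + 1 ∉ p then 1 else -1)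
  else none

lemma pvStepA_get? (d : PySem.Dict Int Int) (p : List Int) (i : Int)
    (h : ∀ x, d.get? x = pvSpecA p x) (x : Int) :
    (pvStepA d i).get? x = pvSpecA (p ++ [i]) x := by
  have hc : d.contains i = decide (i ∈ p ∨ i - 1 ∈ p ∨ i + 1 ∈ p) := by
    rw [PySem.Dict.contains_eq_isSome_get?, h i, pvSpecA]
    by_cases hm : i ∈ p ∨ i - 1 ∈ p ∨ i + 1 ∈ p <;> simp [hm]
  unfold pvStepA pvSpecA
  rw [PySem.Dict.get?_insert, PySem.Dict.get?_insert]
  by_cases h1 : x = i + 1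
  · subst h1
    simp [List.count_append]
  by_cases h2 : x = i - 1
  · subst h2
    simp [h1, List.count_append]
  by_cases h3 : x = i
  · subst h3
    simp only [if_neg h1, if_neg h2]
    rw [hc]
    have hxm : x ∈ p ++ [x] := by simp
    by_cases hm : x ∈ p ∨ x - 1 ∈ p ∨ x + 1 ∈ p
    · rw [if_pos (by simpa using hm), PySem.Dict.get?_insert_self,
        if_pos (Or.inl hxm)]
      have hbad : ¬((p ++ [x]).count x = 1 ∧ x - 1 ∉ p ++ [x] ∧ x + 1 ∉ p ++ [x]) := by
        rintro ⟨hcnt, hn1, hn2⟩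
        rcases hm with hm | hm | hm
        · have h1 : 0 < p.count x := List.count_pos_iff.mpr hm
          have h2 : (p ++ [x]).count x = p.count x + 1 := by
            simp [List.count_append]
          omega
        · exact hn1 (by simp [hm])
        · exact hn2 (by simp [hm])
      rw [if_neg hbad]
    · rw [if_neg (by simpa using hm), PySem.Dict.get?_insert_self,
        if_pos (Or.inl hxm)]
      simp only [not_or] at hm
      obtain ⟨hm1, hm2, hm3⟩ := hm
      have hcnt : (p ++ [x]).count x = 1 := by
        have : p.count x = 0 := List.count_eq_zero.mpr hm1
        simp [List.count_append, this]
      have hn1 : x - 1 ∉ p ++ [x] := by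
        simp only [List.mem_append, List.mem_singleton]
        rintro (h | h)
        · exact hm2 h
        · omega
      have hn2 : x + 1 ∉ p ++ [x] := by
        simp only [List.mem_append, List.mem_singleton]
        rintro (h | h)
        · exact hm3 h
        · omega
      rw [if_pos ⟨hcnt, hn1, hn2⟩]
  · simp only [if_neg h1, if_neg h2]
    have hg : (if d.contains i then d.insert i (-1) else d.insert i 1).get? x = d.get? x := by
      split <;> rw [PySem.Dict.get?_insert_of_ne _ _ h3]
    rw [hg, h x, pvSpecA]
    have e1 : x - 1 ≠ i := by omega
    have e2 : x + 1 ≠ i := by omega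
    have hci : List.count x [i] = 0 := List.count_eq_zero.mpr (by simp [h3])
    simp [List.count_append, h3, e1, e2, hci]

lemma pvFoldA_get? (rest : List Int) : ∀ (p : List Int) (d : PySem.Dict Int Int),
    (∀ x, d.get? x = pvSpecA p x) →
    ∀ x, (rest.foldl pvStepA d).get? x = pvSpecA (p ++ rest) x := by
  induction rest with
  | nil => intro p d h x; simpa using h x
  | cons i rest ih =>
      intro p d h x
      have := ih (p ++ [i]) (pvStepA d i) (pvStepA_get? d p i h)
      simpa [List.append_assoc] using this x

lemma pvDictA_get? (nums : List Int) (x : Int) :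
    (nums.foldl pvStepA PySem.Dict.empty).get? x = pvSpecA nums x := by
  have h0 : ∀ x, (PySem.Dict.empty : PySem.Dict Int Int).get? x = pvSpecA [] x := by
    intro x; simp [pvSpecA, PySem.Dict.get?_empty]
  simpa using pvFoldA_get? nums [] PySem.Dict.empty h0 x

-- membership in a conditional-add fold over a PySem.Set
lemma pvMemFoldAddIf {β : Type} (c : β → Bool) (f : β → Int) (l : List β) :
    ∀ (g : PySem.Set Int) (y : Int),
      (y ∈ l.foldl (fun g p => if c p then PySem.Set.add g (f p) else g) g ↔
        y ∈ g ∨ ∃ p ∈ l, c p = true ∧ f p = y) := by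
  induction l with
  | nil => intro g y; simp
  | cons b l ih =>
      intro g y
      by_cases hb : c b = true
      · simp only [List.foldl_cons, hb, if_pos]
        rw [ih]
        simp only [PySem.Set.mem_add, List.mem_cons]
        constructor
        · rintro (( h | h) | ⟨p, hp, hc, hf⟩)
          · exact Or.inl h
          · exact Or.inr ⟨b, Or.inl rfl, hb, h.symm⟩
          · exact Or.inr ⟨p, Or.inr hp, hc, hf⟩
        · rintro (h | ⟨p, (rfl | hp), hc, hf⟩)
          · exact Or.inl (Or.inl h)
          · exact Or.inl (Or.inr hf.symm)
          · exact Or.inr ⟨p, hp, hc, hf⟩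
      · simp only [List.foldl_cons, hb]
        rw [ih]
        simp only [List.mem_cons]
        constructor
        · rintro (h | ⟨p, hp, hc, hf⟩)
          · exact Or.inl h
          · exact Or.inr ⟨p, Or.inr hp, hc, hf⟩
        · rintro (h | ⟨p, (rfl | hp), hc, hf⟩)
          · exact Or.inl h
          · exact absurd hc hb
          · exact Or.inr ⟨p, hp, hc, hf⟩

-- two distinct positions with the same value force count ≥ 2
lemma pvCountTwo (s : List Int) (x : Int) (j k : Nat) (hjk : j < k) (hk : k < s.length)
    (h1 : s[j]'(lt_trans hjk hk) = x) (h2 : s[k] = x) : 2 ≤ s.count x := by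
  have hsplit : s = s.take (j+1) ++ s.drop (j+1) := (List.take_append_drop _ _).symm
  have hm1 : x ∈ s.take (j+1) := by
    have hjl : j < (s.take (j+1)).length := by
      rw [List.length_take]; omega
    have : (s.take (j+1))[j]'hjl = x := by
      rw [List.getElem_take]; exact h1
    exact this ▸ List.getElem_mem hjl
  have hm2 : x ∈ s.drop (j+1) := by
    have hkl : k - (j+1) < (s.drop (j+1)).length := by
      simp [List.length_drop]; omega
    have : (s.drop (j+1))[k-(j+1)]'hkl = x := by
      rw [List.getElem_drop]
      have : j + 1 + (k - (j+1)) = k := by omega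
      simp_rw [this]; exact h2
    exact this ▸ List.getElem_mem hkl
  have c1 : 0 < (s.take (j+1)).count x := List.count_pos_iff.mpr hm1
  have c2 : 0 < (s.drop (j+1)).count x := List.count_pos_iff.mpr hm2
  calc 2 ≤ (s.take (j+1)).count x + (s.drop (j+1)).count x := by omega
    _ = s.count x := by rw [← List.count_append, ← hsplit]

-- count ≥ 2 at a known position yields another position with the same value
lemma pvOtherIdx (s : List Int) (x : Int) (k : Nat) (hk : k < s.length)
    (hx : s[k] = x) (hc : 2 ≤ s.count x) :
    ∃ j, ∃ hj : j < s.length, j ≠ k ∧ s[j] = x := by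
  have hsplit : s = s.take k ++ s.drop k := (List.take_append_drop _ _).symm
  have hdrop : s.drop k = s[k] :: s.drop (k+1) := (List.getElem_cons_drop hk).symm
  have hcnt : s.count x = (s.take k).count x + ((s.drop (k+1)).count x + 1) := by
    conv_lhs => rw [hsplit]
    rw [List.count_append, hdrop, List.count_cons, hx]
    simp
  have : 0 < (s.take k).count x ∨ 0 < (s.drop (k+1)).count x := by omega
  rcases this with h | h
  · have hm : x ∈ s.take k := List.count_pos_iff.mp h
    obtain ⟨j, hj, hje⟩ := List.mem_iff_getElem.mp hm
    have hjlen : j < s.length := lt_of_lt_of_le hj (by simp [List.length_take])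
    have hjk : j < k := by
      have := hj; simp [List.length_take] at this; omega
    refine ⟨j, hjlen, by omega, ?_⟩
    rw [← hje, List.getElem_take]
  · have hm : x ∈ s.drop (k+1) := List.count_pos_iff.mp h
    obtain ⟨m, hm', hme⟩ := List.mem_iff_getElem.mp hm
    have hmlen : k + 1 + m < s.length := by
      have := hm'; simp [List.length_drop] at this; omega
    refine ⟨k + 1 + m, hmlen, by omega, ?_⟩
    rw [← hme, List.getElem_drop]

-- monotonicity of a Pairwise-(≤) list
lemma pvMono (s : List Int) (hs : s.Pairwise (· ≤ ·)) (i j : Nat) (hij : i ≤ j)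
    (hj : j < s.length) : s[i]'(lt_of_le_of_lt hij hj) ≤ s[j] := by
  rcases lt_or_eq_of_le hij with h | h
  · exact (List.pairwise_iff_getElem.mp hs) i j _ hj h
  · subst h; exact le_refl _

-- the sorted-scan condition characterises count 1 with absent neighbors
lemma pvLonelyIff (s : List Int) (hs : s.Pairwise (· ≤ ·)) (x : Int) :
    (∃ k, ∃ hk : k < s.length, s[k] = x ∧
        (k = 0 ∨ ∃ h : k - 1 < s.length, s[k-1] + 1 < x) ∧
        (k + 1 = s.length ∨ ∃ h : k + 1 < s.length, x + 1 < s[k+1])) ↔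
      (s.count x = 1 ∧ x - 1 ∉ s ∧ x + 1 ∉ s) := by
  constructor
  · rintro ⟨k, hk, hkx, hl, hr⟩
    refine ⟨?_, ?_, ?_⟩
    · -- count = 1
      have hge : 1 ≤ s.count x := List.count_pos_iff.mpr (hkx ▸ List.getElem_mem hk)
      by_contra hne
      have hc2 : 2 ≤ s.count x := by omega
      obtain ⟨j, hj, hjne, hjx⟩ := pvOtherIdx s x k hk hkx hc2
      rcases Nat.lt_or_ge j k with hjk | hjk
      · -- s[k-1] = x, contradicting left guard
        rcases hl with h0 | ⟨_, hlt⟩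
        · omega
        · have h1 : s[j] ≤ s[k-1]'(by omega) := pvMono s hs j (k-1) (by omega) (by omega)
          have h2 : s[k-1]'(by omega) ≤ s[k] := pvMono s hs (k-1) k (by omega) hk
          rw [hjx] at h1; rw [hkx] at h2; omega
      · have hjk' : k < j := by omega
        rcases hr with hend | ⟨hk1, hgt⟩
        · omega
        · have h1 : s[k+1] ≤ s[j] := pvMono s hs (k+1) j (by omega) hj
          rw [hjx] at h1; omega
    · -- x - 1 ∉ s
      intro hm
      obtain ⟨j, hj, hje⟩ := List.mem_iff_getElem.mp hm
      have hjk : j < k := by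
        by_contra hge
        have : s[k] ≤ s[j] := pvMono s hs k j (by omega) hj
        rw [hkx, hje] at this; omega
      rcases hl with h0 | ⟨_, hlt⟩
      · omega
      · have : s[j] ≤ s[k-1]'(by omega) := pvMono s hs j (k-1) (by omega) (by omega)
        rw [hje] at this; omega
    · -- x + 1 ∉ s
      intro hm
      obtain ⟨j, hj, hje⟩ := List.mem_iff_getElem.mp hm
      have hjk : k < j := by
        by_contra hge
        have : s[j] ≤ s[k] := pvMono s hs j k (by omega) hk
        rw [hkx, hje] at this; omega
      rcases hr with hend | ⟨hk1, hgt⟩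
      · omega
      · have : s[k+1] ≤ s[j] := pvMono s hs (k+1) j (by omega) hj
        rw [hje] at this; omega
  · rintro ⟨hc, hn1, hn2⟩
    have hm : x ∈ s := List.count_pos_iff.mp (by omega)
    obtain ⟨k, hk, hke⟩ := List.mem_iff_getElem.mp hm
    refine ⟨k, hk, hke, ?_, ?_⟩
    · rcases Nat.eq_zero_or_pos k with h0 | h0
      · exact Or.inl h0
      · refine Or.inr ⟨by omega, ?_⟩
        have hle : s[k-1]'(by omega) ≤ s[k] := pvMono s hs (k-1) k (by omega) hk
        have hne : s[k-1]'(by omega) ≠ x := by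
          intro he
          have := pvCountTwo s x (k-1) k (by omega) hk he hke
          omega
        have hne1 : s[k-1]'(by omega) ≠ x - 1 := by
          intro he
          exact hn1 (he ▸ List.getElem_mem (by omega : k - 1 < s.length))
        rw [hke] at hle; omega
    · rcases Nat.lt_or_ge (k+1) s.length with hlt | hge
      · refine Or.inr ⟨hlt, ?_⟩
        have hle : s[k] ≤ s[k+1] := pvMono s hs k (k+1) (by omega) hlt
        have hne : s[k+1] ≠ x := by
          intro he
          have := pvCountTwo s x k (k+1) (by omega) hlt hke he
          omega
        have hne1 : s[k+1] ≠ x + 1 := by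
          intro he
          exact hn2 (he ▸ List.getElem_mem hlt)
        rw [hke] at hle; omega
      · exact Or.inl (by omega)

-- ===== VERDICT (by name: the statement is the Claim_ definition above) =====
theorem solution_1478_2_spec : Claim_equal_solution_1478_2 := by
  intro nums _
  unfold Spec_solution_1478_2
  simp only [solution_1478_2, solution_1478_2_alt]
  set s := PySem.List.sorted nums (fun x => x) false with hs_def
  have hperm : s.Perm nums := PySem.List.sorted_perm nums (fun x => x) false
  have hpw : s.Pairwise (· ≤ ·) := by
    have := PySem.List.sorted_pairwise nums (fun x => x)
    simpa using this
  -- A side: fold into a filter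
  change nums.foldl
      (fun l i => if (nums.foldl pvStepA PySem.Dict.empty).getD i 0 = 1 then l ++ [i] else l) []
    = _
  rw [show (fun (l : List Int) (i : Int) =>
        if (nums.foldl pvStepA PySem.Dict.empty).getD i 0 = 1 then l ++ [i] else l)
      = (fun l i =>
        if (fun j => decide ((nums.foldl pvStepA PySem.Dict.empty).getD j 0 = 1)) i = true
        then l ++ [id i] else l) from by funext l i; simp]
  rw [PySem.List.foldl_append_if]
  simp only [List.map_id, List.nil_append]
  apply List.filter_congr
  intro x hx
  have hA : (nums.foldl pvStepA PySem.Dict.empty).getD x 0 =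
      (if nums.count x = 1 ∧ x - 1 ∉ nums ∧ x + 1 ∉ nums then 1 else -1) := by
    rw [PySem.Dict.getD_eq_get?_getD, pvDictA_get? nums x, pvSpecA, if_pos (Or.inl hx)]
    rfl
  -- B side: membership in the lonely set
  have hmem : ∀ y : Int,
      (y ∈ (PySem.List.enumerate s).foldl (fun g p =>
        if ((p.1 == 0) || decide (p.2 - PySem.List.pyGetD s (p.1 - 1) 0 > 1)) &&
           ((p.1 == (s.length : Int) - 1) || decide (PySem.List.pyGetD s (p.1 + 1) 0 - p.2 > 1))
        then PySem.Set.add g p.2 else g) PySem.Set.empty ↔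
        (nums.count y = 1 ∧ y - 1 ∉ nums ∧ y + 1 ∉ nums)) := by
    intro y
    rw [pvMemFoldAddIf, ← hperm.count_eq, ← hperm.mem_iff (a := y - 1),
      ← hperm.mem_iff (a := y + 1), ← pvLonelyIff s hpw y]
    constructor
    · rintro (h | ⟨p, hp, hcond, hval⟩)
      · simp [PySem.Set.empty] at h
      · obtain ⟨k, hk, hpe⟩ := (PySem.List.mem_enumerate_iff _ _ _).mp hp
        subst hpe
        simp only [zero_add] at hcond hval
        refine ⟨k, hk, hval, ?_, ?_⟩
        · rcases Nat.eq_zero_or_pos k with h0 | h0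
          · exact Or.inl h0
          · have hleft : ((k : Int) == 0) = false := by
              simp; omega
            rw [hleft] at hcond
            simp only [Bool.false_or, Bool.and_eq_true, decide_eq_true_eq] at hcond
            obtain ⟨hc1, _⟩ := hcond
            refine Or.inr ⟨by omega, ?_⟩
            rw [PySem.List.pyGetD_eq_getElem s 0 (by omega) (by omega)] at hc1
            have : ((k : Int) - 1).toNat = k - 1 := by omega
            simp only [this] at hc1
            rw [hval] at hc1
            omega
        · rcases Nat.lt_or_ge (k+1) s.length with hlt | hge
          · have hright : ((k : Int) == (s.length : Int) - 1) = false := by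
              simp; omega
            rw [hright] at hcond
            simp only [Bool.false_or, Bool.and_eq_true, decide_eq_true_eq] at hcond
            obtain ⟨_, hc2⟩ := hcond
            refine Or.inr ⟨hlt, ?_⟩
            rw [PySem.List.pyGetD_eq_getElem s 0 (by omega) (by omega)] at hc2
            have : ((k : Int) + 1).toNat = k + 1 := by omega
            simp only [this] at hc2
            rw [hval] at hc2
            omega
          · exact Or.inl (by omega)
    · rintro ⟨k, hk, hkx, hl, hr⟩
      refine Or.inr ⟨((k : Int), s[k]), ?_, ?_, hkx⟩
      · exact (PySem.List.mem_enumerate_iff _ _ _).mpr ⟨k, hk, by simp⟩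
      · have hleft : (((k : Int) == 0) ||
            decide (s[k] - PySem.List.pyGetD s ((k : Int) - 1) 0 > 1)) = true := by
          rcases hl with h0 | ⟨hlen, hlt⟩
          · subst h0; simp
          · have hkpos : 0 < k := by
              rcases Nat.eq_zero_or_pos k with h0 | h0
              · exfalso; subst h0
                simp only [Nat.zero_sub] at hlt
                rw [hkx] at hlt; omega
              · exact h0
            apply Bool.or_eq_true_iff.mpr; right
            rw [PySem.List.pyGetD_eq_getElem s 0 (by omega) (by omega)]
            have : ((k : Int) - 1).toNat = k - 1 := by omega
            simp only [this]
            rw [hkx]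
            simp only [decide_eq_true_eq]
            omega
        have hright : (((k : Int) == (s.length : Int) - 1) ||
            decide (PySem.List.pyGetD s ((k : Int) + 1) 0 - s[k] > 1)) = true := by
          rcases hr with hend | ⟨hlt, hgt⟩
          · apply Bool.or_eq_true_iff.mpr; left
            simp; omega
          · apply Bool.or_eq_true_iff.mpr; right
            rw [PySem.List.pyGetD_eq_getElem s 0 (by omega) (by omega)]
            have : ((k : Int) + 1).toNat = k + 1 := by omega
            simp only [this]
            rw [hkx]
            simp only [decide_eq_true_eq]
            omega
        simp [hleft, hright]
  have hbool : ∀ (L : PySem.Set Int) (P : Prop) [Decidable P],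
      (x ∈ L ↔ P) → PySem.Set.contains L x = decide P := by
    intro L P _ h
    by_cases hP : P
    · simp only [hP, decide_true]
      rw [PySem.Set.contains_iff]
      exact h.mpr hP
    · simp only [hP, decide_false]
      rw [← Bool.not_eq_true, PySem.Set.contains_iff]
      exact fun hm => hP (h.mp hm)
  rw [hbool _ _ (hmem x), hA]
  by_cases hg : nums.count x = 1 ∧ x - 1 ∉ nums ∧ x + 1 ∉ nums
  · rw [if_pos hg]; simp [hg]
  · rw [if_neg hg]; simp [hg]
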